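-- pv_equiv track=rewrite | github.com/akatnik/pogromca-wisielcow | utils.py | selectChar
-- ===== SOURCE A (Python) =====
-- def selectChar(stats, guessed):
--     letter = '-'
--     max = 0
--     for l in stats:
--         if stats[l] > max and l not in guessed:
--             max = stats[l]
--             letter = l
--     return letter
-- ===== SOURCE B (Python) =====
-- def selectChar(stats, guessed):
--     cands = [(l, v) for l, v in stats.items() if v > 0 and l not in guessed]
--     if not cands:
--         return '-'
--     best = max(v for _, v in cands)
--     for l, v in cands:
--         if v == best:
--             return l
-- ===== Notes on version B (the rewrite author's own statement) =====
-- stated objective: alternative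
-- what changed: Replaces the single running-(max,letter) state loop by a two-phase decomposition: build the candidate list (value>0, not guessed), take the maximum value, then return the first candidate attaining it.
import Mathlib
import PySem

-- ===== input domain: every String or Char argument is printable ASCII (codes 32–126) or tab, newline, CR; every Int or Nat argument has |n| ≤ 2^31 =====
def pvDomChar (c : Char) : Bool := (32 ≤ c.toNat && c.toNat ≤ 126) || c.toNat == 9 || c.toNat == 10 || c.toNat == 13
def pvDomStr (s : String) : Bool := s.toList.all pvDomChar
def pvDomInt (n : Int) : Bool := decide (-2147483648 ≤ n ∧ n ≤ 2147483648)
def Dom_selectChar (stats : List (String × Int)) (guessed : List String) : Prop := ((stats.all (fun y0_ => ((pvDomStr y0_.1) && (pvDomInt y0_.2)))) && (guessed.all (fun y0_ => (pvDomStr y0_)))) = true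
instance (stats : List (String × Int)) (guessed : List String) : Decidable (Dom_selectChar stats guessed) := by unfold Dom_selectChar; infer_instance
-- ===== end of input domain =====

-- B replaces A's running-(letter,max) loop by filter-candidates / max value / first attaining it (alternative decomposition, same cost).
-- Pre_ excludes association lists with duplicate keys: 'stats' models a Python dict, whose keys are necessarily distinct.


-- ===== PORT A =====
-- 'for l in stats' iterates the dict's keys in order; 'stats[l]' is the dict lookup (l is always a key, so the default is unreachable)
def selectChar (stats : List (String × Int)) (guessed : List String) : String :=
  (stats.foldl
    (fun (st : String × Int) p =>
      let v := (PySem.Dict.mk stats).getD p.1 0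
      if st.2 < v && !(guessed.contains p.1) then (p.1, v) else st)
    ("-", 0)).1

-- ===== PORT B =====
def selectChar_alt (stats : List (String × Int)) (guessed : List String) : String :=
  let cands := stats.filter (fun p => decide (0 < p.2) && !(guessed.contains p.1))
  if cands.isEmpty then "-"
  else
    match PySem.List.max? (cands.map Prod.snd) (fun v => v) with
    | none => "-"
    | some best =>
      match cands.find? (fun p => p.2 == best) with
      | some p => p.1
      | none => "-"

-- ===== PRECONDITION & SPEC =====
-- Pre_ excludes association lists with duplicate keys: they are outside the image of any Python dict input
-- (the Python function receives a dict, which cannot have duplicate keys).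
def Pre_selectChar (stats : List (String × Int)) (guessed : List String) : Prop :=
  (stats.map Prod.fst).Nodup
instance (stats : List (String × Int)) (guessed : List String) : Decidable (Pre_selectChar stats guessed) := by unfold Pre_selectChar; infer_instance
def pvWitness_selectChar : (List (String × Int)) × List String := ([("a", 3), ("b", 1)], ["b"])

def Spec_selectChar (stats : List (String × Int)) (guessed : List String) (out : String) : Prop := out = selectChar_alt stats guessed
instance (stats : List (String × Int)) (guessed : List String) (out : String) : Decidable (Spec_selectChar stats guessed out) := by unfold Spec_selectChar; infer_instance

-- ===== CLAIM (what is proved, stated in full; the proofs are below) =====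
def Claim_equal_selectChar : Prop := ∀ (stats : List (String × Int)) (guessed : List String), Dom_selectChar stats guessed → Pre_selectChar stats guessed → Spec_selectChar stats guessed (selectChar stats guessed)

-- ===== LEMMAS AND PROOFS =====

-- the "winner" of A's loop over xs with running maximum m, if any update happens
def pickAux (guessed : List String) : List (String × Int) → Int → Option (String × Int)
  | [], _ => none
  | p :: xs, m =>
    if m < p.2 && !(guessed.contains p.1) then some ((pickAux guessed xs p.2).getD p)
    else pickAux guessed xs m

theorem foldl_eq_pickAux (guessed : List String) (xs : List (String × Int)) :
    ∀ (s : String) (m : Int),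
      xs.foldl (fun (st : String × Int) p =>
        if st.2 < p.2 && !(guessed.contains p.1) then (p.1, p.2) else st) (s, m)
      = match pickAux guessed xs m with
        | some p => p
        | none => (s, m) := by
  induction xs with
  | nil => intro s m; simp [pickAux]
  | cons x t ih =>
    intro s m
    by_cases h : (m < x.2 && !(guessed.contains x.1)) = true
    · simp only [List.foldl_cons, pickAux, h, if_pos, if_true]
      rw [ih x.1 x.2]
      cases hp : pickAux guessed t x.2 <;> simp [hp, Option.getD]
    · simp only [List.foldl_cons, pickAux, h, if_neg, Bool.false_eq_true, not_false_iff, if_false]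
      exact ih s m

theorem pickAux_none (guessed : List String) (xs : List (String × Int)) :
    ∀ (m : Int), pickAux guessed xs m = none →
      ∀ q ∈ xs, guessed.contains q.1 = false → q.2 ≤ m := by
  induction xs with
  | nil => intro m _ q hq; simp at hq
  | cons x t ih =>
    intro m h q hq hc
    by_cases hx : (m < x.2 && !(guessed.contains x.1)) = true
    · exfalso
      simp only [pickAux] at h
      rw [if_pos hx] at h
      exact Option.some_ne_none _ h
    · simp only [pickAux] at h
      rw [if_neg hx] at h
      have hx' : ¬ (m < x.2 ∧ guessed.contains x.1 = false) := by
        simpa [Bool.and_eq_true, Bool.not_eq_true'] using hx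
      rcases List.mem_cons.mp hq with hq | hq
      · subst hq
        by_contra h'
        exact hx' ⟨not_le.mp h', hc⟩
      · exact ih m h q hq hc

theorem pickAux_some (guessed : List String) (xs : List (String × Int)) :
    ∀ (m : Int) (p : String × Int), pickAux guessed xs m = some p →
      m < p.2 ∧ guessed.contains p.1 = false ∧
      ∃ l1 l2, xs = l1 ++ p :: l2 ∧
        (∀ q ∈ l1, guessed.contains q.1 = false → q.2 < p.2) ∧
        (∀ q ∈ l2, guessed.contains q.1 = false → q.2 ≤ p.2) := by
  induction xs with
  | nil => intro m p h; simp [pickAux] at h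
  | cons x t ih =>
    intro m p h
    by_cases hx : (m < x.2 && !(guessed.contains x.1)) = true
    · simp only [pickAux] at h
      rw [if_pos hx] at h
      have hxc : guessed.contains x.1 = false := by
        simp only [Bool.and_eq_true, Bool.not_eq_true'] at hx; exact hx.2
      have hxm : m < x.2 := by
        simp only [Bool.and_eq_true, decide_eq_true_eq] at hx; exact hx.1
      cases hrec : pickAux guessed t x.2 with
      | none =>
        rw [hrec] at h
        simp only [Option.getD_none, Option.some.injEq] at h
        subst h
        exact ⟨hxm, hxc, [], t, rfl, by simp, pickAux_none guessed t x.2 hrec⟩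
      | some q =>
        rw [hrec] at h
        simp only [Option.getD_some, Option.some.injEq] at h
        subst h
        obtain ⟨h1, h2, l1, l2, heq, hl1, hl2⟩ := ih x.2 q hrec
        refine ⟨lt_trans hxm h1, h2, x :: l1, l2, by simp [heq], ?_, hl2⟩
        intro r hr hrc
        rcases List.mem_cons.mp hr with hr | hr
        · subst hr; exact h1
        · exact hl1 r hr hrc
    · simp only [pickAux] at h
      rw [if_neg hx] at h
      have hx' : ¬ (m < x.2 ∧ guessed.contains x.1 = false) := by
        simpa [Bool.and_eq_true, Bool.not_eq_true'] using hx
      obtain ⟨h1, h2, l1, l2, heq, hl1, hl2⟩ := ih m p h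
      refine ⟨h1, h2, x :: l1, l2, by simp [heq], ?_, hl2⟩
      intro r hr hrc
      rcases List.mem_cons.mp hr with hr | hr
      · subst hr
        have hxle : r.2 ≤ m := not_lt.mp (fun hg => hx' ⟨hg, hrc⟩)
        omega
      · exact hl1 r hr hrc

theorem foldl_max_eq (v : Int) (t : List Int) :
    ∀ (x : Int), x ≤ v → (∀ w ∈ t, w ≤ v) → (x = v ∨ v ∈ t) → t.foldl max x = v := by
  induction t with
  | nil => intro x hx _ hm; simpa using hm.resolve_right (by simp)
  | cons a t ih =>
    intro x hx ht hm
    simp only [List.foldl_cons]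
    have ha : a ≤ v := ht a (by simp)
    rcases hm with hm | hm
    · subst hm; exact ih _ (by simp [ha]) (fun w hw => ht w (by simp [hw])) (Or.inl (by omega))
    · rcases List.mem_cons.mp hm with hm | hm
      · subst hm; exact ih _ (by simp [hx]) (fun w hw => ht w (by simp [hw])) (Or.inl (by omega))
      · exact ih _ (by simp [hx, ha]) (fun w hw => ht w (by simp [hw])) (Or.inr hm)

theorem getD_mk_of_mem (stats : List (String × Int)) (p : String × Int)
    (hmem : p ∈ stats) (hnd : (stats.map Prod.fst).Nodup) :
    (PySem.Dict.mk stats).getD p.1 0 = p.2 := by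
  apply PySem.Dict.getD_of_mem_items
  · simpa [PySem.Dict.items] using hmem
  · simpa [PySem.Dict.keys, PySem.Dict.items] using hnd

-- ===== VERDICT (by name: the statement is the Claim_ definition above) =====
theorem selectChar_spec : Claim_equal_selectChar := by
  intro stats guessed _ hpre
  unfold Spec_selectChar selectChar selectChar_alt
  have hfold : stats.foldl
      (fun (st : String × Int) p =>
        let v := (PySem.Dict.mk stats).getD p.1 0
        if st.2 < v && !(guessed.contains p.1) then (p.1, v) else st) ("-", 0)
      = stats.foldl
      (fun (st : String × Int) p =>
        if st.2 < p.2 && !(guessed.contains p.1) then (p.1, p.2) else st) ("-", 0) := by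
    apply PySem.List.foldl_congr_mem
    intro acc x hx
    rw [getD_mk_of_mem stats x hx hpre]
  rw [hfold, foldl_eq_pickAux guessed stats "-" 0]
  cases hpick : pickAux guessed stats 0 with
  | none =>
    have hnone := pickAux_none guessed stats 0 hpick
    have hcands : stats.filter (fun p => decide (0 < p.2) && !(guessed.contains p.1)) = [] := by
      rw [List.filter_eq_nil_iff]
      intro q hq
      simp only [Bool.and_eq_true, decide_eq_true_eq, Bool.not_eq_true', not_and]
      intro h0 hc
      exact absurd (hnone q hq hc) (by omega)
    simp only [hcands]
    rfl
  | some p =>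
    obtain ⟨h0, hc, l1, l2, heq, hl1, hl2⟩ := pickAux_some guessed stats 0 p hpick
    have hcm : p.1 ∉ guessed := by simpa using hc
    have hpp : (decide (0 < p.2) && !(guessed.contains p.1)) = true := by
      simp [h0, hcm]
    have hcands : stats.filter (fun q => decide (0 < q.2) && !(guessed.contains q.1))
        = l1.filter (fun q => decide (0 < q.2) && !(guessed.contains q.1))
          ++ p :: l2.filter (fun q => decide (0 < q.2) && !(guessed.contains q.1)) := by
      rw [heq, List.filter_append, List.filter_cons, if_pos hpp]
    set f1 := l1.filter (fun q => decide (0 < q.2) && !(guessed.contains q.1)) with hf1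
    set f2 := l2.filter (fun q => decide (0 < q.2) && !(guessed.contains q.1)) with hf2
    have hf1lt : ∀ q ∈ f1, q.2 < p.2 := by
      intro q hq
      have := List.of_mem_filter hq
      simp only [Bool.and_eq_true, decide_eq_true_eq, Bool.not_eq_true'] at this
      exact hl1 q (List.mem_of_mem_filter hq) this.2
    have hf2le : ∀ q ∈ f2, q.2 ≤ p.2 := by
      intro q hq
      have := List.of_mem_filter hq
      simp only [Bool.and_eq_true, decide_eq_true_eq, Bool.not_eq_true'] at this
      exact hl2 q (List.mem_of_mem_filter hq) this.2
    have hne : (f1 ++ p :: f2).isEmpty = false := by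
      simp [List.isEmpty_eq_false_iff]
    -- the maximum of the candidate values is p.2
    have hmax : PySem.List.max? ((f1 ++ p :: f2).map Prod.snd) (fun v => v) = some p.2 := by
      cases hcase : (f1 ++ p :: f2).map Prod.snd with
      | nil => simp at hcase
      | cons y ys =>
        rw [PySem.List.max?_id_cons]
        have hyle : y ≤ p.2 ∧ ∀ w ∈ ys, w ≤ p.2 := by
          have hall : ∀ w ∈ (f1 ++ p :: f2).map Prod.snd, w ≤ p.2 := by
            intro w hw
            obtain ⟨q, hq, hqw⟩ := List.mem_map.mp hw
            subst hqw
            rcases List.mem_append.mp hq with hq | hq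
            · exact le_of_lt (hf1lt q hq)
            · rcases List.mem_cons.mp hq with hq | hq
              · subst hq; exact le_refl _
              · exact hf2le q hq
          constructor
          · exact hall y (by rw [hcase]; simp)
          · intro w hw; exact hall w (by rw [hcase]; simp [hw])
        have hmem : p.2 = y ∨ p.2 ∈ ys := by
          have : p.2 ∈ (f1 ++ p :: f2).map Prod.snd := List.mem_map.mpr ⟨p, by simp, rfl⟩
          rw [hcase] at this
          simpa using this
        congr 1
        exact foldl_max_eq p.2 ys y hyle.1 hyle.2 (hmem.imp Eq.symm id)
    -- the first candidate with the maximal value is p itself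
    have hfind : (f1 ++ p :: f2).find? (fun q => q.2 == p.2) = some p := by
      rw [List.find?_append]
      have h1 : f1.find? (fun q => q.2 == p.2) = none := by
        rw [List.find?_eq_none]
        intro q hq
        simp only [beq_iff_eq]
        exact ne_of_lt (hf1lt q hq)
      rw [h1]
      simp [List.find?_cons]
    simp only [hcands, hne, Bool.false_eq_true, if_false, hmax, hfind]
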